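-- pv_equiv track=rewrite | github.com/Shmu9/dns-resolver | DNSmessage.py | labels2text
-- ===== SOURCE A (Python) =====
-- def labels2text(labels):
--     """Return textual representation of domain name."""
--     name_parts = []
--     for label in labels:
--         part = ''
--         for c in label:
--             char = chr(c)
--             if c in b'.\\':
--                 part += ("\\" + char)
--             elif c > 32 and c < 127:            # printable ascii
--                 part += char
--             else:
--                 part += "\\{:03d}".format(c)    # as decimal (0-128)
--         name_parts.append(part)
--
--     if name_parts == ['']:
--         return "."
--     return ".".join(name_parts)
-- ===== SOURCE B (Python) =====
-- def labels2text(labels):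
--     """Return textual representation of domain name."""
--     table = []
--     for c in range(256):
--         ch = chr(c)
--         if ch in '.\\':
--             table.append('\\' + ch)
--         elif 32 < c < 127:
--             table.append(ch)
--         else:
--             table.append('\\{:03d}'.format(c))
--     name_parts = [''.join(table[c] for c in label) for label in labels]
--     if name_parts == ['']:
--         return '.'
--     return '.'.join(name_parts)
-- ===== Notes on version B (the rewrite author's own statement) =====
-- stated objective: alternative
-- what changed: B precomputes a 256-entry escape table once and builds each label part by joining table lookups (a single map/join pass), instead of A's per-byte branch chain re-evaluated inside an accumulating string loop.
import Mathlib
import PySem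

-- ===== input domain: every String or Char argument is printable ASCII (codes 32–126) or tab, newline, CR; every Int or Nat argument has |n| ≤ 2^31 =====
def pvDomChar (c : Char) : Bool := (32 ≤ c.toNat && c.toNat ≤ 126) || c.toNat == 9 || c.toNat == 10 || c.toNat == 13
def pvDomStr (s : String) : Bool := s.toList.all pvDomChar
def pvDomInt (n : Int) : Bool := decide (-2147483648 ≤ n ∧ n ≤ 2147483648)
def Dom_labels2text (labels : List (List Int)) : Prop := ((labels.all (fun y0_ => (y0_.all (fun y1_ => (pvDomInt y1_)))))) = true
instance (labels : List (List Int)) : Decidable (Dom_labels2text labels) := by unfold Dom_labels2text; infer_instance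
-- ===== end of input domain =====

-- B replaces A's per-byte branch chain by one precomputed 256-entry escape table joined per label (alternative structure, same cost).
-- ===== PORT A =====
-- '\{:03d}'.format(c) for 0 ≤ c is str(c) left-zero-padded to width 3 (exact via PySem.Str.zfill);
-- chr(c) is Char.ofNat c.toNat, exact on Pre_ (0 ≤ c < 256).
def labels2text (labels : List (List Int)) : String :=
  let name_parts := labels.foldl (fun acc label =>
    acc ++ [label.foldl (fun part c =>
      part ++
        (if c = 46 ∨ c = 92 then "\\" ++ String.singleton (Char.ofNat c.toNat)
         else if 32 < c ∧ c < 127 then String.singleton (Char.ofNat c.toNat)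
         else "\\" ++ PySem.Str.zfill (PySem.Int.toStr c) 3)) ""]) []
  if name_parts = [""] then "." else PySem.Str.join "." name_parts

-- ===== PORT B =====
def pvTable : List String :=
  (List.range 256).map (fun n =>
    let ch := Char.ofNat n
    if ch = '.' ∨ ch = '\\' then "\\" ++ String.singleton ch
    else if 32 < n ∧ n < 127 then String.singleton ch
    else "\\" ++ PySem.Str.zfill (PySem.Int.toStr (n : Int)) 3)

def labels2text_alt (labels : List (List Int)) : String :=
  let name_parts := labels.map (fun label =>
    PySem.Str.join "" (label.map (fun c => PySem.List.pyGetD pvTable c "")))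
  if name_parts = [""] then "." else PySem.Str.join "." name_parts

-- ===== PRECONDITION & SPEC =====
-- A raises (ValueError from chr / the bytes membership test) on any byte outside 0..255, so
-- Pre_ is exactly A's return domain.
def Pre_labels2text (labels : List (List Int)) : Prop :=
  ∀ label ∈ labels, ∀ c ∈ label, 0 ≤ c ∧ c < 256
instance (labels : List (List Int)) : Decidable (Pre_labels2text labels) := by
  unfold Pre_labels2text; infer_instance
def pvWitness_labels2text : List (List Int) := [[119, 119, 119], [46, 0, 200], []]
def Spec_labels2text (labels : List (List Int)) (out : String) : Prop := out = labels2text_alt labels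
instance (labels : List (List Int)) (out : String) : Decidable (Spec_labels2text labels out) := by
  unfold Spec_labels2text; infer_instance

-- ===== CLAIM (what is proved, stated in full; the proofs are below) =====
def Claim_equal_labels2text : Prop := ∀ (labels : List (List Int)), Dom_labels2text labels → Pre_labels2text labels → Spec_labels2text labels (labels2text labels)

-- ===== LEMMAS AND PROOFS =====

lemma intercalate_nil_sep {α : Type} : ∀ (l : List (List α)), List.intercalate [] l = l.flatten
  | [] => rfl
  | [x] => by simp [List.intercalate]
  | x :: y :: rest => by
      have := intercalate_nil_sep (y :: rest)
      simp [List.intercalate, List.intersperse] at this ⊢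
      simp [this]

-- A's per-byte escape, named for the proofs (identical to the inline expression in the port of A).
def escA (c : Int) : String :=
  if c = 46 ∨ c = 92 then "\\" ++ String.singleton (Char.ofNat c.toNat)
  else if 32 < c ∧ c < 127 then String.singleton (Char.ofNat c.toNat)
  else "\\" ++ PySem.Str.zfill (PySem.Int.toStr c) 3

set_option maxRecDepth 4000 in
lemma table_eq_escA : ∀ n ∈ List.range 256,
    (pvTable[n]? : Option String) = some (escA (n : Int)) := by decide

lemma lookup_eq_escA (c : Int) (h0 : 0 ≤ c) (h1 : c < 256) :
    PySem.List.pyGetD pvTable c "" = escA c := by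
  obtain ⟨n, rfl⟩ := Int.eq_ofNat_of_zero_le h0
  have hn : n ∈ List.range 256 := by
    simp only [List.mem_range]; exact_mod_cast h1
  have := table_eq_escA n hn
  rw [PySem.List.pyGetD_natCast]
  simp [List.getD, this]

lemma part_eq (label : List Int) (h : ∀ c ∈ label, 0 ≤ c ∧ c < 256) (init : String) :
    label.foldl (fun part c => part ++ escA c) init
      = init ++ PySem.Str.join "" (label.map (fun c => PySem.List.pyGetD pvTable c "")) := by
  induction label generalizing init with
  | nil => simp [PySem.Str.join]
  | cons c cs ih =>
    have hc := h c (List.mem_cons_self ..)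
    have hcs : ∀ x ∈ cs, 0 ≤ x ∧ x < 256 := fun x hx => h x (List.mem_cons_of_mem _ hx)
    simp only [List.foldl_cons, List.map_cons, ih hcs]
    rw [lookup_eq_escA c hc.1 hc.2]
    apply String.ext
    simp [PySem.Str.join, PySem.Chars.join, intercalate_nil_sep]

-- ===== VERDICT (by name: the statement is the Claim_ definition above) =====
theorem labels2text_spec : Claim_equal_labels2text := by
  intro labels _ hpre
  unfold Spec_labels2text labels2text labels2text_alt
  have : labels.foldl (fun acc label =>
      acc ++ [label.foldl (fun part c => part ++ escA c) ""]) []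
      = labels.map (fun label =>
          PySem.Str.join "" (label.map (fun c => PySem.List.pyGetD pvTable c ""))) := by
    rw [PySem.List.foldl_append_singleton_eq_map]
    simp only [List.nil_append]
    exact List.map_congr_left (fun label hl => part_eq label (hpre label hl) "")
  rw [show (fun (part : String) (c : Int) =>
      part ++ (if c = 46 ∨ c = 92 then "\\" ++ String.singleton (Char.ofNat c.toNat)
        else if 32 < c ∧ c < 127 then String.singleton (Char.ofNat c.toNat)
        else "\\" ++ PySem.Str.zfill (PySem.Int.toStr c) 3)) = (fun part c => part ++ escA c) from rfl]
  rw [this]
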